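-- pv_equiv track=rewrite | github.com/MiguelAngelPerdomo/Proyecto_Maestr-a | Regex_Fuzzy.py | filtrar_codigos
-- ===== SOURCE A (Python) =====
-- def filtrar_codigos(codigos_extraidos, diccionario_diagnosticos):
--     codigos_validos = []
--     for c in codigos_extraidos:
--         if c in diccionario_diagnosticos:
--             codigos_validos.append(c)
--         elif c.endswith('X'):
--             c_sin_x = c[:-1]
--             if c_sin_x in diccionario_diagnosticos:
--                 codigos_validos.append(c_sin_x)
--     codigos_reales = [c for c in codigos_validos if c not in {
--         "Z022", "Z023", "Z024", "Z000", "Z001", "Z002", "Z003", "Z004"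
--     }]
--     if codigos_reales:
--         codigos_validos = codigos_reales
--     return codigos_validos[:2]
-- ===== SOURCE B (Python) =====
-- _EXCLUIDOS = {"Z022", "Z023", "Z024", "Z000", "Z001", "Z002", "Z003", "Z004"}
--
--
-- def _resolver(c, diccionario_diagnosticos):
--     """The code kept for c, or None."""
--     if c in diccionario_diagnosticos:
--         return c
--     if c.endswith('X'):
--         s = c[:-1]
--         if s in diccionario_diagnosticos:
--             return s
--     return None
--
--
-- def filtrar_codigos(codigos_extraidos, diccionario_diagnosticos):
--     # Only the first two results ever matter, so keep bounded accumulators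
--     # (at most 2 each) and STOP as soon as two non-excluded codes are found,
--     # instead of A's full collect-then-refilter passes.
--     validos = []
--     reales = []
--     for c in codigos_extraidos:
--         code = _resolver(c, diccionario_diagnosticos)
--         if code is None:
--             continue
--         if len(validos) < 2:
--             validos = validos + [code]
--         if code not in _EXCLUIDOS:
--             reales = reales + [code]
--             if len(reales) == 2:
--                 return reales
--     return reales if reales else validos
-- ===== Notes on version B (the rewrite author's own statement) =====
-- stated objective: faster
-- what changed: Replaces A's collect-all-then-refilter passes by an early-terminating scan with bounded accumulators: it keeps at most two valid and two non-excluded codes and returns immediately once two non-excluded codes are found, never materialising the full lists.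
import Mathlib
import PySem

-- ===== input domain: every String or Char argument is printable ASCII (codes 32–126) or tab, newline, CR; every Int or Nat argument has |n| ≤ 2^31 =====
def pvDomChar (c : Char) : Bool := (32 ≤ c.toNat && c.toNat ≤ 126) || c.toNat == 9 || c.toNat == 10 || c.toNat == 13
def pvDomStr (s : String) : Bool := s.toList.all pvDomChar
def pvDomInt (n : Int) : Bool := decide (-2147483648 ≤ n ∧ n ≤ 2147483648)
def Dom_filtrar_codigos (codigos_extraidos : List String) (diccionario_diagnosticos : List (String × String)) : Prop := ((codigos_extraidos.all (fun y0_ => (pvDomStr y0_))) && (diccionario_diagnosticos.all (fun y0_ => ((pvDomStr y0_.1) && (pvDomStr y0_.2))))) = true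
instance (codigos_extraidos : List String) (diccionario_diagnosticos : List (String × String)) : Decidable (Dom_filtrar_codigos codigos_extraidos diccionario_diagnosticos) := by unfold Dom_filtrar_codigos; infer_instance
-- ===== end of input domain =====

-- B replaces A's collect-all-then-refilter passes by an early-terminating scan with
-- bounded (≤ 2) accumulators that returns as soon as two non-excluded codes are found.

-- ===== PORT A =====
-- Excluded Z-codes (the set literal in A)
def pvExcl : List String := ["Z022", "Z023", "Z024", "Z000", "Z001", "Z002", "Z003", "Z004"]

-- 'c in diccionario_diagnosticos' = key membership in the dict
def pvKeyMem (dd : List (String × String)) (c : String) : Bool := dd.any (fun kv => kv.1 == c)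

def filtrar_codigos (codigos_extraidos : List String) (diccionario_diagnosticos : List (String × String)) : List String :=
  let codigos_validos := codigos_extraidos.foldl (fun acc c =>
    if pvKeyMem diccionario_diagnosticos c then acc ++ [c]
    else if PySem.Str.endswith c "X" then
      let c_sin_x := PySem.Str.slice c none (some (-1))
      if pvKeyMem diccionario_diagnosticos c_sin_x then acc ++ [c_sin_x] else acc
    else acc) []
  let codigos_reales := codigos_validos.filter (fun c => !(pvExcl.contains c))
  let codigos_validos := if codigos_reales.isEmpty then codigos_validos else codigos_reales
  codigos_validos.take 2

-- ===== PORT B =====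
-- _resolver: the code kept for c, or none
def pvResolver (c : String) (dd : List (String × String)) : Option String :=
  if pvKeyMem dd c then some c
  else if PySem.Str.endswith c "X" then
    let s := PySem.Str.slice c none (some (-1))
    if pvKeyMem dd s then some s else none
  else none

-- the early-terminating loop of B (Python's for-loop with 'return' inside)
def pvLoopB (dd : List (String × String)) : List String → List String → List String → List String
  | [], validos, reales => if reales.isEmpty then validos else reales
  | c :: rest, validos, reales =>
    match pvResolver c dd with
    | none => pvLoopB dd rest validos reales
    | some code =>
      let validos' := if validos.length < 2 then validos ++ [code] else validos
      if pvExcl.contains code then pvLoopB dd rest validos' reales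
      else
        let reales' := reales ++ [code]
        if reales'.length == 2 then reales' else pvLoopB dd rest validos' reales'

def filtrar_codigos_alt (codigos_extraidos : List String) (diccionario_diagnosticos : List (String × String)) : List String :=
  pvLoopB diccionario_diagnosticos codigos_extraidos [] []

-- ===== PRECONDITION & SPEC =====
def Spec_filtrar_codigos (codigos_extraidos : List String) (diccionario_diagnosticos : List (String × String)) (out : List String) : Prop := out = filtrar_codigos_alt codigos_extraidos diccionario_diagnosticos
instance (codigos_extraidos : List String) (diccionario_diagnosticos : List (String × String)) (out : List String) : Decidable (Spec_filtrar_codigos codigos_extraidos diccionario_diagnosticos out) := by unfold Spec_filtrar_codigos; infer_instance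

-- ===== CLAIM (what is proved, stated in full; the proofs are below) =====
def Claim_equal_filtrar_codigos : Prop := ∀ (codigos_extraidos : List String) (diccionario_diagnosticos : List (String × String)), Dom_filtrar_codigos codigos_extraidos diccionario_diagnosticos → Spec_filtrar_codigos codigos_extraidos diccionario_diagnosticos (filtrar_codigos codigos_extraidos diccionario_diagnosticos)

-- ===== LEMMAS AND PROOFS =====

-- what A's first loop emits for a single code (0 or 1 element)
def pvEmit (dd : List (String × String)) (c : String) : List String :=
  match pvResolver c dd with
  | some code => [code]
  | none => []

def pvKeep (c : String) : Bool := !(pvExcl.contains c)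

-- A's loop body appends exactly pvEmit
lemma stepA_eq_emit (dd : List (String × String)) (acc : List String) (c : String) :
    (if pvKeyMem dd c then acc ++ [c]
     else if PySem.Str.endswith c "X" then
       let c_sin_x := PySem.Str.slice c none (some (-1))
       if pvKeyMem dd c_sin_x then acc ++ [c_sin_x] else acc
     else acc) = acc ++ pvEmit dd c := by
  unfold pvEmit pvResolver
  by_cases h1 : pvKeyMem dd c
  · simp [h1]
  · by_cases h2 : PySem.Chars.endswith c.toList ['X']
    · by_cases h3 : pvKeyMem dd (PySem.Str.slice c none (some (-1))) <;>
        simp [h1, h2, h3, PySem.Str.endswith]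
    · simp [h1, h2, PySem.Str.endswith]

lemma validosA_eq (dd : List (String × String)) (ce : List String) :
    ce.foldl (fun acc c =>
      if pvKeyMem dd c then acc ++ [c]
      else if PySem.Str.endswith c "X" then
        let c_sin_x := PySem.Str.slice c none (some (-1))
        if pvKeyMem dd c_sin_x then acc ++ [c_sin_x] else acc
      else acc) [] = ce.flatMap (pvEmit dd) := by
  have hfun : (fun (acc : List String) (c : String) =>
      if pvKeyMem dd c then acc ++ [c]
      else if PySem.Str.endswith c "X" then
        let c_sin_x := PySem.Str.slice c none (some (-1))
        if pvKeyMem dd c_sin_x then acc ++ [c_sin_x] else acc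
      else acc) = (fun acc c => acc ++ pvEmit dd c) := by
    funext acc c; exact stepA_eq_emit dd acc c
  rw [hfun, PySem.List.foldl_append_eq_flatMap]
  simp

lemma take2_snoc (v : List String) (x : String) :
    (v ++ [x]).take 2 = if v.length < 2 then v ++ [x] else v.take 2 := by
  match v with
  | [] => simp
  | [a] => simp
  | a :: b :: t => simp [List.take]

-- invariant of B's loop: state is (A's validos-so-far truncated to 2, its non-excluded part,
-- which has length ≤ 1 or the loop would already have returned)
lemma loopB_inv (dd : List (String × String)) (rest : List String) :
    ∀ v : List String, (v.filter pvKeep).length ≤ 1 →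
    pvLoopB dd rest (v.take 2) (v.filter pvKeep) =
      (let V := v ++ rest.flatMap (pvEmit dd)
       let R := V.filter pvKeep
       (if R.isEmpty then V else R).take 2) := by
  induction rest with
  | nil =>
    intro v hv
    simp only [List.flatMap_nil, List.append_nil, pvLoopB]
    by_cases h : (v.filter pvKeep).isEmpty
    · simp [h]
    · rw [if_neg h, if_neg h]
      exact (List.take_of_length_le (by omega)).symm
  | cons c rest ih =>
    intro v hv
    cases hres : pvResolver c dd with
    | none =>
      have hemit : pvEmit dd c = [] := by simp [pvEmit, hres]
      simp only [pvLoopB, hres, List.flatMap_cons, hemit, List.nil_append]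
      exact ih v hv
    | some code =>
      have hemit : pvEmit dd c = [code] := by simp [pvEmit, hres]
      simp only [pvLoopB, hres, List.flatMap_cons, hemit]
      have hval : (if (v.take 2).length < 2 then v.take 2 ++ [code] else v.take 2)
          = (v ++ [code]).take 2 := by
        rw [take2_snoc]
        by_cases h : v.length < 2
        · rw [if_pos (by simp only [List.length_take]; omega), if_pos h,
            List.take_of_length_le (by omega)]
        · rw [if_neg (by simp only [List.length_take]; omega), if_neg h]
      rw [hval]
      by_cases hexc : pvExcl.contains code
      · have hk : pvKeep code = false := by unfold pvKeep; rw [hexc]; rfl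
        have hfil : (v ++ [code]).filter pvKeep = v.filter pvKeep := by
          simp [List.filter_append, hk]
      -- excluded: reales unchanged
        simp only [hexc, if_true]
        have hx := ih (v ++ [code]) (by rw [hfil]; exact hv)
        rw [hfil] at hx
        rw [hx]
        simp only [List.append_assoc, List.singleton_append]
      · have hk : pvKeep code = true := by
          unfold pvKeep
          cases hc : pvExcl.contains code
          · rfl
          · exact absurd hc hexc
        have hfil : (v ++ [code]).filter pvKeep = v.filter pvKeep ++ [code] := by
          simp [List.filter_append, hk]
        simp only [hexc, Bool.false_eq_true, if_false]
        have hVR : (v ++ ([code] ++ rest.flatMap (pvEmit dd))).filter pvKeep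
            = v.filter pvKeep ++ [code] ++ (rest.flatMap (pvEmit dd)).filter pvKeep := by
          rw [show v ++ ([code] ++ rest.flatMap (pvEmit dd))
              = (v ++ [code]) ++ rest.flatMap (pvEmit dd) by simp,
            List.filter_append, hfil]
        by_cases hlen : (v.filter pvKeep ++ [code]).length = 2
        · -- early return: two non-excluded codes found
          rw [if_pos (by simpa using hlen)]
          obtain ⟨a, ha⟩ : ∃ a, v.filter pvKeep = [a] := by
            have h1 : (v.filter pvKeep).length = 1 := by
              simp only [List.length_append, List.length_cons, List.length_nil] at hlen; omega
            match hfe : v.filter pvKeep with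
            | [a] => exact ⟨a, rfl⟩
            | [] => rw [hfe] at h1; simp at h1
            | a :: b :: t => rw [hfe] at h1; simp at h1
          simp only [hVR, ha]
          rw [if_neg (by simp)]
          simp
        · rw [if_neg (by simpa using hlen)]
          have hlen1 : ((v ++ [code]).filter pvKeep).length ≤ 1 := by
            rw [hfil]
            simp only [List.length_append, List.length_cons, List.length_nil] at hlen ⊢
            omega
          have hx := ih (v ++ [code]) hlen1
          rw [hfil] at hx
          rw [hx]
          simp only [List.append_assoc, List.singleton_append]

-- ===== VERDICT (by name: the statement is the Claim_ definition above) =====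
theorem filtrar_codigos_spec : Claim_equal_filtrar_codigos := by
  intro ce dd _
  unfold Spec_filtrar_codigos filtrar_codigos filtrar_codigos_alt
  rw [validosA_eq]
  have h := loopB_inv dd ce [] (by simp)
  simp only [List.take_nil, List.filter_nil, List.nil_append] at h
  rw [show (fun c => !pvExcl.contains c) = pvKeep from rfl, h]
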